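-- pv_equiv track=rewrite | github.com/jramaswami/Binary_Search_Python | sentence_reversal.py | solve
-- ===== SOURCE A (Python) =====
-- def solve(sentence):
--     sentence = sentence[::-1]
--     i = 0
--     for j, c in enumerate(sentence):
--         if c == " ":
--             sentence[i:j] = reversed(sentence[i:j])
--             i = j + 1
--     sentence[i:] = reversed(sentence[i:])
--     return sentence
-- ===== SOURCE B (Python) =====
-- def solve(sentence):
--     # Single left-to-right scan splitting into tokens on " ", then rebuild
--     # from the reversed token list, joining with one " " element.
--     tokens = []
--     cur = []
--     for c in sentence:
--         if c == " ":
--             tokens.append(cur)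
--             cur = []
--         else:
--             cur.append(c)
--     tokens.append(cur)
--     tokens.reverse()
--     out = []
--     for k, t in enumerate(tokens):
--         if k != 0:
--             out.append(" ")
--         out.extend(t)
--     return out
-- ===== Notes on version B (the rewrite author's own statement) =====
-- stated objective: simpler
-- what changed: B replaces A's reverse-the-whole-list-then-reverse-each-segment-in-place slice surgery with a plain split-into-tokens pass followed by a join of the reversed token list with single spaces, building a fresh list.
import Mathlib
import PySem

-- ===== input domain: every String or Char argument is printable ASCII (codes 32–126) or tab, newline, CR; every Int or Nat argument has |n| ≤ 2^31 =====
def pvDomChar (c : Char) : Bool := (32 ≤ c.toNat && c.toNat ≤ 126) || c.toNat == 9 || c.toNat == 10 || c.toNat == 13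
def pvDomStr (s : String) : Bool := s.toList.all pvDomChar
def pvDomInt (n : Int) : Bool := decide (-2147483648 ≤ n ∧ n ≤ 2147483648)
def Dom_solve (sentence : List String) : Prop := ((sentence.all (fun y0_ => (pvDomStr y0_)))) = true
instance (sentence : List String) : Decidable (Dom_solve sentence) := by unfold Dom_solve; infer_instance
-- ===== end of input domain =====

-- B reverses the word order by one split pass + one join pass over fresh lists,
-- instead of A's in-place segment reversals over the reversed copy (objective: simpler).
-- A mutates only its local copy (sentence[::-1]); neither program mutates the argument.

-- ===== PORT A =====
-- loop body of A's 'for j, c in enumerate(sentence)':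
--   'sentence[i:j] = reversed(sentence[i:j])' is the slice assignment
--   take i ++ (slice i j).reverse ++ drop j; here 0 ≤ i ≤ j ≤ len, where slice = take/drop exactly.
-- NOTE on enumerate: Python iterates the live list, but each slice assignment only
-- rewrites indices < j (positions already passed) and keeps the length, so the values
-- read at indices ≥ j equal those of the snapshot; iterating the snapshot is exact.
def stepA (st : List String × Int) (jc : Int × String) : List String × Int :=
  if jc.2 == " " then
    (PySem.List.slice st.1 none (some st.2)
       ++ (PySem.List.slice st.1 (some st.2) (some jc.1)).reverse
       ++ PySem.List.slice st.1 (some jc.1) none,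
     jc.1 + 1)
  else st

def solve (sentence : List String) : List String :=
  -- sentence = sentence[::-1]  (slice with step -1 is reverse: PySem.List.slice?_none_none_neg_one)
  let s := sentence.reverse
  let st := (PySem.List.enumerate s 0).foldl stepA (s, 0)
  -- sentence[i:] = reversed(sentence[i:]); return sentence
  PySem.List.slice st.1 none (some st.2) ++ (PySem.List.slice st.1 (some st.2) none).reverse

-- ===== PORT B =====
-- loop body of B's splitting pass ('tokens.append(cur); cur = []' / 'cur.append(c)')
def stepB (st : List (List String) × List String) (c : String) : List (List String) × List String :=
  if c == " " then (st.1 ++ [st.2], []) else (st.1, st.2 ++ [c])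

-- loop body of B's joining pass ('if k != 0: out.append(" "); out.extend(t)')
def stepJ (out : List String) (kt : Int × List String) : List String :=
  (if kt.1 != 0 then out ++ [" "] else out) ++ kt.2

def solve_alt (sentence : List String) : List String :=
  let st := sentence.foldl stepB ([], [])
  let tokens := (st.1 ++ [st.2]).reverse
  (PySem.List.enumerate tokens 0).foldl stepJ []

-- ===== PRECONDITION & SPEC =====
def Spec_solve (sentence : List String) (out : List String) : Prop := out = solve_alt sentence
instance (sentence : List String) (out : List String) : Decidable (Spec_solve sentence out) := by unfold Spec_solve; infer_instance

-- ===== CLAIM (what is proved, stated in full; the proofs are below) =====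
def Claim_equal_solve : Prop := ∀ (sentence : List String), Dom_solve sentence → Spec_solve sentence (solve sentence)

-- ===== LEMMAS AND PROOFS =====

-- the tokens of a sentence, split on " " (always nonempty; empty tokens for edge/consecutive spaces)
def words : List String → List (List String)
  | [] => [[]]
  | c :: t =>
    if c == " " then [] :: words t
    else match words t with
      | [] => [[c]]
      | w :: ws => (c :: w) :: ws

-- A's epilogue: sentence[:i] ++ reversed(sentence[i:])
def finishA (st : List String × Int) : List String :=
  PySem.List.slice st.1 none (some st.2) ++ (PySem.List.slice st.1 (some st.2) none).reverse

theorem words_ne_nil (l : List String) : words l ≠ [] := by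
  cases l with
  | nil => simp [words]
  | cons c t =>
    simp only [words]
    split
    · simp
    · split <;> simp

-- join tokens with a single " " element between consecutive tokens
def joinSp : List (List String) → List String
  | [] => []
  | t :: ts => t ++ ts.flatMap (fun w => " " :: w)

theorem flatMap_joinSp (ts : List (List String)) (h : ts ≠ []) :
    ts.flatMap (fun w => " " :: w) = " " :: joinSp ts := by
  cases ts with
  | nil => exact absurd rfl h
  | cons t ts => simp [joinSp]

theorem words_no_space (t : List String) (h : ∀ c ∈ t, (c == " ") = false) :
    words t = [t] := by
  induction t with
  | nil => rfl
  | cons c t ih =>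
    have hc := h c (by simp)
    have ht : words t = [t] := ih (fun c hc => h c (by simp [hc]))
    simp [words, hc, ht]

theorem words_append_space (w t : List String) (h : ∀ c ∈ w, (c == " ") = false) :
    words (w ++ " " :: t) = w :: words t := by
  induction w with
  | nil => simp [words]
  | cons c w ih =>
    have hc := h c (by simp)
    have hw := ih (fun c hc => h c (by simp [hc]))
    simp only [List.cons_append, words, hc, Bool.false_eq_true, if_false, hw]

theorem words_snoc (u : List String) (c : String) :
    words (u ++ [c]) = if c == " " then words u ++ [[]]
      else (words u).dropLast ++ [(words u).getLastD [] ++ [c]] := by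
  induction u with
  | nil =>
    by_cases hc : (c == " ") = true <;> simp [words, hc]
  | cons d u ih =>
    by_cases hd : (d == " ") = true
    · by_cases hc : (c == " ") = true
      · simp [words, hd, hc, ih]
      · simp [words, hd, hc, ih, List.dropLast_cons_of_ne_nil (words_ne_nil u)]
        rcases hu : words u with _ | ⟨x, xs⟩
        · exact absurd hu (words_ne_nil u)
        · simp
    · rcases hu : words u with _ | ⟨w, ws⟩
      · exact absurd hu (words_ne_nil u)
      · by_cases hc : (c == " ") = true
        · simp only [List.cons_append, words, hd, Bool.false_eq_true, if_false, ih, hc, if_true,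
            hu]
        · simp only [List.cons_append, words, hd, Bool.false_eq_true, if_false, ih, hc, hu]
          cases ws with
          | nil => simp
          | cons w' ws' =>
            rw [List.dropLast_cons_of_ne_nil (by simp), List.getLastD_cons]
            simp only [List.dropLast_cons_of_ne_nil (List.cons_ne_nil w' ws'), List.cons_append,
              List.cons.injEq, true_and]
            rcases hgl : (w' :: ws').getLast? with _ | x
            · simp at hgl
            · simp [List.getLastD_eq_getLast?, hgl]

-- splitting commutes with reversal: the tokens of the reversed list are the
-- reversed tokens, each itself reversed
theorem words_reverse (l : List String) :
    words l.reverse = ((words l).map List.reverse).reverse := by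
  induction l with
  | nil => simp [words]
  | cons c t ih =>
    rw [List.reverse_cons, words_snoc, ih]
    by_cases hc : (c == " ") = true
    · simp [words, hc]
    · rcases ht : words t with _ | ⟨w, ws⟩
      · exact absurd ht (words_ne_nil t)
      · simp [words, hc, ht]

-- ---- A's loop ----

theorem foldl_stepA_no_space (t : List String) (h : ∀ c ∈ t, (c == " ") = false) :
    ∀ (i : Int) (st : List String × Int),
      (PySem.List.enumerate t i).foldl stepA st = st := by
  induction t with
  | nil => intro i st; simp [PySem.List.enumerate_nil]
  | cons c t ih =>
    intro i st
    have hc := h c (by simp)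
    rw [PySem.List.enumerate_cons, List.foldl_cons]
    have : stepA st (i, c) = st := by simp [stepA, hc]
    rw [this]
    exact ih (fun c hc => h c (by simp [hc])) _ _

theorem aloop (n : Nat) : ∀ (t done : List String), t.length ≤ n →
    finishA ((PySem.List.enumerate t (done.length : Int)).foldl stepA
        (done ++ t, (done.length : Int)))
      = done ++ joinSp ((words t).map List.reverse) := by
  induction n with
  | zero =>
    intro t done ht
    have : t = [] := List.eq_nil_of_length_eq_zero (Nat.le_zero.mp ht)
    subst this
    simp [PySem.List.enumerate_nil, finishA, PySem.List.slice_to_natCast,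
      PySem.List.slice_from_natCast, words, joinSp]
  | succ n ih =>
    intro t done ht
    by_cases hsp : " " ∈ t
    · -- t = w ++ " " :: t' with w the spaceless prefix; the loop fires once at the space,
      -- reversing the finished word, then continues on t'
      set w := t.takeWhile (fun x => x != " ") with hw
      have hwns : ∀ c ∈ w, (c == " ") = false := by
        intro c hc
        have := List.mem_takeWhile_imp hc
        simpa using this
      rcases hd : t.dropWhile (fun x => x != " ") with _ | ⟨a, t'⟩
      · exfalso
        have := (List.dropWhile_eq_nil_iff).mp hd " " hsp
        simp at this
      · have ha : a = " " := by
          have hne : t.dropWhile (fun x => x != " ") ≠ [] := by simp [hd]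
          have hha := List.head_dropWhile_not (fun x => x != " ") (l := t) hne
          have hhd : (t.dropWhile (fun x => x != " ")).head hne = a := by simp [hd]
          rw [hhd] at hha
          simpa using hha
        subst ha
        have hteq : t = w ++ " " :: t' := by
          conv_lhs => rw [← List.takeWhile_append_dropWhile (p := fun x => x != " ") (l := t)]
          rw [hd]
        have hlen : t'.length ≤ n := by
          have := congrArg List.length hteq
          simp at this
          omega
        have h1 : PySem.List.slice (done ++ (w ++ " " :: t')) none (some (done.length : Int))
            = done := by
          rw [PySem.List.slice_to_natCast, List.take_left]
        have h2 : PySem.List.slice (done ++ (w ++ " " :: t')) (some (done.length : Int))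
            (some ((done.length : Int) + (w.length : Int))) = w := by
          rw [PySem.List.slice_natCast_add, List.drop_left, List.take_left]
        have h3 : PySem.List.slice (done ++ (w ++ " " :: t'))
            (some ((done.length : Int) + (w.length : Int))) none = " " :: t' := by
          rw [show (done.length : Int) + (w.length : Int) = (((done ++ w).length : Nat) : Int)
              from by push_cast [List.length_append]; ring,
            PySem.List.slice_from_natCast,
            show done ++ (w ++ " " :: t') = (done ++ w) ++ (" " :: t') from by simp,
            List.drop_left]
        have hstep : stepA (done ++ (w ++ " " :: t'), (done.length : Int))
            ((done.length : Int) + (w.length : Int), " ")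
            = ((done ++ w.reverse ++ [" "]) ++ t',
               (((done ++ w.reverse ++ [" "]).length : Nat) : Int)) := by
          have hsp2 : (" " == " ") = true := rfl
          simp only [stepA, hsp2, if_true, h1, h2, h3, Prod.mk.injEq]
          exact ⟨by simp, by
            simp only [List.length_append, List.length_reverse, List.length_cons,
              List.length_nil]
            push_cast; omega⟩
        rw [hteq, PySem.List.enumerate_append, List.foldl_append,
          foldl_stepA_no_space w hwns, PySem.List.enumerate_cons, List.foldl_cons, hstep,
          show ((done.length : Int) + (w.length : Int) + 1)
              = (((done ++ w.reverse ++ [" "]).length : Nat) : Int) from by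
            simp only [List.length_append, List.length_reverse, List.length_cons,
              List.length_nil]
            push_cast; omega]
        rw [ih t' (done ++ w.reverse ++ [" "]) hlen]
        rw [words_append_space w t' hwns]
        have hnn : ((words t').map List.reverse) ≠ [] := by
          simp [words_ne_nil]
        simp [joinSp, flatMap_joinSp _ hnn]
    · -- no space: the loop is a no-op and the epilogue reverses the whole list
      have hns : ∀ c ∈ t, (c == " ") = false := by
        intro c hc
        by_contra hcf
        exact hsp (by simpa using (eq_of_beq (by simpa using hcf) : c = " ") ▸ hc)
      rw [foldl_stepA_no_space t hns, words_no_space t hns]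
      simp [finishA, PySem.List.slice_to_natCast, PySem.List.slice_from_natCast, joinSp]

-- ---- B's passes ----

-- left-to-right splitter mirroring stepB's accumulator
def splitAcc (cur : List String) : List String → List (List String) × List String
  | [] => ([], cur)
  | c :: t =>
    if c == " " then ((cur :: (splitAcc [] t).1), (splitAcc [] t).2)
    else splitAcc (cur ++ [c]) t

theorem foldl_stepB (l : List String) : ∀ (tks : List (List String)) (cur : List String),
    l.foldl stepB (tks, cur) = (tks ++ (splitAcc cur l).1, (splitAcc cur l).2) := by
  induction l with
  | nil => intro tks cur; simp [splitAcc]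
  | cons c t ih =>
    intro tks cur
    by_cases hc : (c == " ") = true
    · simp [stepB, hc, splitAcc, ih]
    · simp [stepB, hc, splitAcc, ih]

theorem splitAcc_words (l : List String) : ∀ cur,
    (splitAcc cur l).1 ++ [(splitAcc cur l).2] = (words l).modifyHead (cur ++ ·) := by
  induction l with
  | nil => intro cur; simp [splitAcc, words]
  | cons c t ih =>
    intro cur
    by_cases hc : (c == " ") = true
    · have h0 : (splitAcc [] t).1 ++ [(splitAcc [] t).2] = words t := by
        rw [ih []]; cases words t <;> simp
      simp [splitAcc, hc, words, h0]
    · rcases ht : words t with _ | ⟨w, ws⟩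
      · exact absurd ht (words_ne_nil t)
      · simp only [splitAcc, hc, Bool.false_eq_true, if_false, words, ih (cur ++ [c]), ht]
        simp

theorem foldl_stepJ_aux (ts : List (List String)) : ∀ (s : Int) (out : List String), 1 ≤ s →
    (PySem.List.enumerate ts s).foldl stepJ out = out ++ ts.flatMap (fun w => " " :: w) := by
  induction ts with
  | nil => intro s out _; simp [PySem.List.enumerate_nil]
  | cons t ts ih =>
    intro s out hs
    rw [PySem.List.enumerate_cons, List.foldl_cons]
    have hsne : (s != 0) = true := by simp; omega
    rw [show stepJ out (s, t) = out ++ " " :: t from by simp [stepJ, hsne]]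
    rw [ih (s + 1) _ (by omega)]
    simp

theorem foldl_stepJ (ts : List (List String)) :
    (PySem.List.enumerate ts 0).foldl stepJ [] = joinSp ts := by
  cases ts with
  | nil => simp [PySem.List.enumerate_nil, joinSp]
  | cons t ts =>
    rw [PySem.List.enumerate_cons, List.foldl_cons]
    rw [show stepJ [] ((0 : Int), t) = t from by simp [stepJ]]
    rw [show (0 : Int) + 1 = 1 from rfl, foldl_stepJ_aux ts 1 t (by omega)]
    cases ts with
    | nil => simp [joinSp]
    | cons t' ts' => simp [joinSp]

theorem solve_alt_eq (l : List String) : solve_alt l = joinSp ((words l).reverse) := by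
  unfold solve_alt
  rw [foldl_stepB]
  have h0 : (splitAcc [] l).1 ++ [(splitAcc [] l).2] = words l := by
    rw [splitAcc_words l []]; cases words l <;> simp
  simp only [List.nil_append, h0]
  exact foldl_stepJ _

theorem solve_eq (l : List String) : solve l = joinSp ((words l.reverse).map List.reverse) := by
  have h := aloop l.reverse.length l.reverse [] (le_refl _)
  simpa [solve, finishA] using h

-- ===== VERDICT (by name: the statement is the Claim_ definition above) =====
theorem solve_spec : Claim_equal_solve := by
  intro sentence _
  unfold Spec_solve
  rw [solve_eq, solve_alt_eq, words_reverse]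
  simp [List.map_map]
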